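-- pv_equiv track=rewrite | github.com/silahbo-jpg/sila-system | scripts/utils_new/auto_register_modules.py | find_import_section_end
-- ===== SOURCE A (Python) =====
-- def find_import_section_end(content: str) -> int:
--     """Find the line number where imports end."""
--     lines = content.split('\n')
--
--     last_import_line = 0
--     for i, line in enumerate(lines):
--         stripped = line.strip()
--         if (stripped.startswith('from ') or stripped.startswith('import ')) and not stripped.startswith('#'):
--             last_import_line = i
--
--     # Find the next non-empty line after imports
--     for i in range(last_import_line + 1, len(lines)):
--         if lines[i].strip():
--             return i
--
--     return last_import_line + 1
-- ===== SOURCE B (Python) =====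
-- def find_import_section_end(content: str) -> int:
--     """Find the line number where imports end (single forward pass)."""
--     last_import_line = 0
--     candidate = None
--     for i, line in enumerate(content.split('\n')):
--         stripped = line.strip()
--         if stripped.startswith(('from ', 'import ')):
--             last_import_line = i
--             candidate = None
--         elif stripped and candidate is None and last_import_line < i:
--             candidate = i
--     return candidate if candidate is not None else last_import_line + 1
-- ===== Notes on version B (the rewrite author's own statement) =====
-- stated objective: simpler
-- what changed: A's two passes (a full scan for the last import line, then a second scan from there for the next non-empty line) are fused into one forward pass over enumerate(lines) that maintains last_import_line and a candidate index reset on every import line; A's redundant comment-prefix test, which can never fire after a from/import prefix match, is dropped.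
import Mathlib
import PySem

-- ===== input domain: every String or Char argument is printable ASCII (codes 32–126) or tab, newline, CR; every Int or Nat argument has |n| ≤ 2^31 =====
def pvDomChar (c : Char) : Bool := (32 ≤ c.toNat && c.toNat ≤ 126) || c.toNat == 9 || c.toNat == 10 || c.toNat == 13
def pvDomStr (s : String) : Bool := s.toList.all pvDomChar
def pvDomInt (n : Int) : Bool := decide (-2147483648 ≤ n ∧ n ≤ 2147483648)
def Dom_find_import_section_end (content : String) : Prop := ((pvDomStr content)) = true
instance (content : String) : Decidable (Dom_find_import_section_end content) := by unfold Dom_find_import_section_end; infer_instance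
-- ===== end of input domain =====

-- B fuses A's two passes into one forward pass (simpler); return values proved equal on all inputs.

-- ===== PORT A =====
-- A's second loop: 'for i in range(i0, n): if lines[i].strip(): return i' — some i = the early return, none = loop exhausted
def pvALoop2 (lines : List String) (i n : Int) : Option Int :=
  if h : i < n then
    if PySem.Str.strip (PySem.List.pyGetD lines i "") ≠ "" then some i
    else pvALoop2 lines (i + 1) n
  else none
termination_by (n - i).toNat
decreasing_by omega

def find_import_section_end (content : String) : Int :=
  -- content.split('\n'): sep ≠ "" so split? is always some; getD only unwraps it
  let lines := (PySem.Str.split? content "\n").getD []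
  -- Python's local 'stripped = line.strip()' is inlined into the condition
  let last_import_line := (PySem.List.enumerate lines).foldl
    (fun last p =>
      if (PySem.Str.startswith (PySem.Str.strip p.2) "from "
            || PySem.Str.startswith (PySem.Str.strip p.2) "import ")
          && !(PySem.Str.startswith (PySem.Str.strip p.2) "#")
      then p.1 else last) 0
  ((pvALoop2 lines (last_import_line + 1) lines.length).getD (last_import_line + 1))

-- ===== PORT B =====
def find_import_section_end_alt (content : String) : Int :=
  let lines := (PySem.Str.split? content "\n").getD []
  -- state = (last_import_line, candidate); 'stripped' inlined as in port A
  let st := (PySem.List.enumerate lines).foldl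
    (fun (st : Int × Option Int) p =>
      if PySem.Str.startswith (PySem.Str.strip p.2) "from "
          || PySem.Str.startswith (PySem.Str.strip p.2) "import " then
        (p.1, none)
      else if PySem.Str.strip p.2 ≠ "" ∧ st.2 = none ∧ st.1 < p.1 then
        (st.1, some p.1)
      else st) ((0 : Int), (none : Option Int))
  match st.2 with
  | some c => c
  | none => st.1 + 1

-- ===== PRECONDITION & SPEC =====
def Spec_find_import_section_end (content : String) (out : Int) : Prop := out = find_import_section_end_alt content
instance (content : String) (out : Int) : Decidable (Spec_find_import_section_end content out) := by unfold Spec_find_import_section_end; infer_instance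

-- ===== CLAIM (what is proved, stated in full; the proofs are below) =====
def Claim_equal_find_import_section_end : Prop := ∀ (content : String), Dom_find_import_section_end content → Spec_find_import_section_end content (find_import_section_end content)

-- ===== LEMMAS AND PROOFS =====

-- abbreviations for the two line predicates
def pvImp (s : String) : Bool :=
  PySem.Str.startswith (PySem.Str.strip s) "from " || PySem.Str.startswith (PySem.Str.strip s) "import "

abbrev pvNe (s : String) : Prop := PySem.Str.strip s ≠ ""

-- A's '#' test is vacuous: a line starting with 'from '/'import ' does not start with '#'
lemma pvStartswith_hash_false_of_from (t : String) (h : PySem.Str.startswith t "from " = true) :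
    PySem.Str.startswith t "#" = false := by
  simp only [PySem.Str.startswith_eq] at *
  cases hl : t.toList with
  | nil => simp_all [PySem.Chars.startswith]
  | cons c cs =>
    simp_all [PySem.Chars.startswith, List.isPrefixOf]
    obtain ⟨h1, -⟩ := h
    subst h1; decide

lemma pvStartswith_hash_false_of_import (t : String) (h : PySem.Str.startswith t "import " = true) :
    PySem.Str.startswith t "#" = false := by
  simp only [PySem.Str.startswith_eq] at *
  cases hl : t.toList with
  | nil => simp_all [PySem.Chars.startswith]
  | cons c cs =>
    simp_all [PySem.Chars.startswith, List.isPrefixOf]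
    obtain ⟨h1, -⟩ := h
    subst h1; decide

lemma pvImp_eq (s : String) :
    ((PySem.Str.startswith (PySem.Str.strip s) "from " || PySem.Str.startswith (PySem.Str.strip s) "import ")
      && !(PySem.Str.startswith (PySem.Str.strip s) "#")) = pvImp s := by
  unfold pvImp
  cases hf : PySem.Str.startswith (PySem.Str.strip s) "from " with
  | true => simp only [pvStartswith_hash_false_of_from _ hf, Bool.not_false, Bool.and_true]
  | false =>
    cases hi : PySem.Str.startswith (PySem.Str.strip s) "import " with
    | true => simp only [pvStartswith_hash_false_of_import _ hi, Bool.not_false, Bool.and_true]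
    | false => simp

-- B's step function
def pvStepB (st : Int × Option Int) (p : Int × String) : Int × Option Int :=
  if pvImp p.2 then (p.1, none)
  else if pvNe p.2 ∧ st.2 = none ∧ st.1 < p.1 then (st.1, some p.1)
  else st

-- A's step function (first loop)
def pvStepA (last : Int) (p : Int × String) : Int := if pvImp p.2 then p.1 else last

-- the lambdas in the two ports ARE pvStepB / pvStepA
lemma pvLamB_eq :
    (fun (st : Int × Option Int) (p : Int × String) =>
      if PySem.Str.startswith (PySem.Str.strip p.2) "from "
          || PySem.Str.startswith (PySem.Str.strip p.2) "import " then
        (p.1, none)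
      else if PySem.Str.strip p.2 ≠ "" ∧ st.2 = none ∧ st.1 < p.1 then
        (st.1, some p.1)
      else st) = pvStepB := by
  funext st p
  simp only [pvStepB, pvImp, pvNe]

lemma pvLamA_eq :
    (fun (last : Int) (p : Int × String) =>
      if (PySem.Str.startswith (PySem.Str.strip p.2) "from "
            || PySem.Str.startswith (PySem.Str.strip p.2) "import ")
          && !(PySem.Str.startswith (PySem.Str.strip p.2) "#")
      then p.1 else last) = pvStepA := by
  funext last p
  simp only [pvStepA, pvImp_eq]

-- first component of B's fold is A's fold
lemma pvFoldB_fst (lines : List String) (s : Int) (st : Int × Option Int) :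
    ((PySem.List.enumerate lines s).foldl pvStepB st).1
      = (PySem.List.enumerate lines s).foldl pvStepA st.1 := by
  induction lines generalizing s st with
  | nil => simp [PySem.List.enumerate_nil]
  | cons x xs ih =>
    rw [PySem.List.enumerate_cons, List.foldl_cons, List.foldl_cons, ih]
    have h1 : (pvStepB st (s, x)).1 = pvStepA st.1 (s, x) := by
      simp only [pvStepB, pvStepA]
      split_ifs <;> rfl
    rw [h1]

-- the invariant carried by B's fold: the first component is in range (or 0), and the second
-- is the first non-empty line index strictly after the first component (none if there is none)
def pvInv (lines : List String) (st : Int × Option Int) : Prop :=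
  0 ≤ st.1 ∧ (st.1 < lines.length ∨ st.1 = 0) ∧
  (match st.2 with
   | none => ∀ j : Nat, (hj : j < lines.length) → st.1 < (j : Int) → ¬ pvNe lines[j]
   | some c => st.1 < c ∧ c < lines.length ∧ ∃ hc : c.toNat < lines.length,
       pvNe lines[c.toNat] ∧ ∀ j : Nat, (hj : j < lines.length) → st.1 < (j : Int) → (j : Int) < c → ¬ pvNe lines[j])

lemma pvInv_holds (lines : List String) :
    pvInv lines ((PySem.List.enumerate lines 0).foldl pvStepB (0, none)) := by
  induction lines using List.reverseRecOn with
  | nil => simp [pvInv, PySem.List.enumerate_nil]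
  | append_singleton xs x ih =>
    rw [PySem.List.enumerate_append, List.foldl_append]
    simp only [PySem.List.enumerate_cons, PySem.List.enumerate_nil, List.foldl_cons,
      List.foldl_nil, zero_add]
    set st := (PySem.List.enumerate xs 0).foldl pvStepB (0, none) with hst
    obtain ⟨h0, hlt, hcand⟩ := ih
    have hgetl : ∀ (j : Nat) (hj : j < xs.length), (xs ++ [x])[j]'(by simp; omega) = xs[j] := by
      intro j hj; rw [List.getElem_append_left]
    have hgetr : (xs ++ [x])[xs.length]'(by simp) = x := by simp
    simp only [pvStepB]
    split_ifs with h1 h2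
    · -- import line: state becomes (xs.length, none)
      refine ⟨by positivity, by simp, ?_⟩
      intro j hj hlt'
      simp at hj
      omega
    · -- new candidate at index xs.length
      obtain ⟨hne, hnone, hlts⟩ := h2
      refine ⟨h0, by simp; omega, ?_⟩
      refine ⟨hlts, by simp, ⟨by simp, ?_, ?_⟩⟩
      · simpa using hne
      · intro j hj h1' h2'
        have hj' : j < xs.length := by simp at h2'; omega
        rw [hgetl j hj']
        rw [hnone] at hcand
        exact hcand j hj' h1'
    · -- unchanged state
      refine ⟨h0, ?_, ?_⟩
      · rcases hlt with h | h
        · left; simp; omega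
        · right; exact h
      · cases hc : st.2 with
        | none =>
          rw [hc] at hcand
          intro j hj hlt'
          simp at hj
          rcases Nat.lt_or_ge j xs.length with hj' | hj'
          · rw [hgetl j hj']; exact hcand j hj' hlt'
          · have : j = xs.length := by omega
            subst this
            rw [hgetr]
            -- x is neither an import nor recordable: the failed guard h2 forces ¬ pvNe x
            intro hne
            exact h2 ⟨hne, hc, hlt'⟩
        | some c =>
          rw [hc] at hcand
          obtain ⟨hc1, hc2, hcc, hcne, hmin⟩ := hcand
          refine ⟨hc1, by simp; omega, ⟨by simp; omega, ?_, ?_⟩⟩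
          · rw [hgetl c.toNat (by omega)]; exact hcne
          · intro j hj hj1 hj2
            have hj' : j < xs.length := by omega
            rw [hgetl j hj']
            exact hmin j hj' hj1 hj2

-- pvALoop2 computes exactly the candidate the invariant describes
lemma pvALoop2_spec (lines : List String) (i : Int) (cand : Option Int) (h0 : 0 ≤ i)
    (hc : match cand with
          | none => ∀ j : Nat, (hj : j < lines.length) → i ≤ (j : Int) → ¬ pvNe lines[j]
          | some c => i ≤ c ∧ c < lines.length ∧ ∃ hcc : c.toNat < lines.length,
              pvNe lines[c.toNat] ∧ ∀ j : Nat, (hj : j < lines.length) → i ≤ (j : Int) → (j : Int) < c → ¬ pvNe lines[j]) :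
    pvALoop2 lines i lines.length = cand := by
  by_cases h : i < (lines.length : Int)
  · rw [pvALoop2, dif_pos h]
    have hiN : i.toNat < lines.length := by omega
    rw [PySem.List.pyGetD_eq_getElem lines "" h0 h]
    by_cases hne : pvNe lines[i.toNat]
    · rw [if_pos hne]
      cases cand with
      | none => exact absurd hne (hc i.toNat hiN (by omega))
      | some c =>
        obtain ⟨hc1, hc2, hcc, hcne, hmin⟩ := hc
        congr 1
        by_contra hic
        have : i < c := by omega
        exact absurd hne (hmin i.toNat hiN (by omega) (by omega))
    · rw [if_neg hne]
      apply pvALoop2_spec lines (i + 1) cand (by omega)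
      cases cand with
      | none =>
        intro j hj hij
        rcases Nat.lt_or_ge i.toNat j with hj' | hj'
        · exact hc j hj (by omega)
        · have : j = i.toNat := by omega
          subst this; exact hne
      | some c =>
        obtain ⟨hc1, hc2, hcc, hcne, hmin⟩ := hc
        have hic : i ≠ c := by
          intro hh
          subst hh
          exact hne hcne
        exact ⟨by omega, hc2, hcc, hcne, fun j hj h1 h2 => hmin j hj (by omega) h2⟩
  · rw [pvALoop2, dif_neg h]
    cases cand with
    | none => rfl
    | some c =>
      obtain ⟨hc1, hc2, -⟩ := hc
      omega
termination_by (lines.length - i).toNat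
decreasing_by omega

-- ===== VERDICT (by name: the statement is the Claim_ definition above) =====
theorem find_import_section_end_spec : Claim_equal_find_import_section_end := by
  intro content _
  unfold Spec_find_import_section_end find_import_section_end find_import_section_end_alt
  dsimp only
  rw [pvLamA_eq, pvLamB_eq]
  set lines := (PySem.Str.split? content "\n").getD [] with hlines
  set st := (PySem.List.enumerate lines 0).foldl pvStepB (0, none) with hst
  have hfst : (PySem.List.enumerate lines 0).foldl pvStepA 0 = st.1 :=
    (pvFoldB_fst lines 0 (0, none)).symm
  rw [hfst]
  have hinv := pvInv_holds lines
  rw [← hst] at hinv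
  obtain ⟨h0, hlt, hcand⟩ := hinv
  have hloop : pvALoop2 lines (st.1 + 1) lines.length = st.2 := by
    apply pvALoop2_spec lines (st.1 + 1) st.2 (by omega)
    cases hc : st.2 with
    | none =>
      rw [hc] at hcand
      intro j hj hij
      exact hcand j hj (by omega)
    | some c =>
      rw [hc] at hcand
      obtain ⟨hc1, hc2, hcc, hcne, hmin⟩ := hcand
      exact ⟨by omega, hc2, hcc, hcne, fun j hj h1 h2 => hmin j hj (by omega) h2⟩
  rw [hloop]
  cases hc : st.2 with
  | none => rfl
  | some c => rfl
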